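-- pv_equiv track=rewrite | github.com/wreckinaj/LeetCode-Portfolio | Arrays-and-Hashing/1957.py | makeFancyString
-- ===== SOURCE A (Python) =====
-- def makeFancyString(s: str) -> str:
--     # Use a pointer to keep track of where we find the last "unique" character
--     p = 0
--     # Keep track of how many times we run into the character
--     curr = 1
--     # Need to start a new string since strings are immutable
--     fancy_string = s[0]
--     for i in range (1, len(s)):
--         # Increment count if we run into consecutive characters
--         if s[i] == s[p]:
--             curr += 1
--         # Here we reset the counter and track a new character
--         else:
--             curr = 1
--             p = i
--         # Do not append to string if we will end up with three (or more) in a row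
--         if curr > 2:
--             continue
--         fancy_string += s[i]
--     return fancy_string
-- ===== SOURCE B (Python) =====
-- def makeFancyString(s: str) -> str:
--     # Run-based two-pointer pass: keep at most 2 chars of each maximal run.
--     out = []
--     i = 0
--     n = len(s)
--     while i < n:
--         j = i
--         while j < n and s[j] == s[i]:
--             j += 1
--         out.append(s[i] * min(2, j - i))
--         i = j
--     return "".join(out)
-- ===== Notes on version B (the rewrite author's own statement) =====
-- stated objective: alternative
-- what changed: Replaced the index-pointer+counter single pass (p, curr, char-by-char append with a skip when curr>2) by a run-based two-pointer scan that finds each maximal run of equal characters and emits min(2, run length) copies of it.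
-- outside the precondition, e.g. on makeFancyString(''): A raises IndexError, B returns ''
-- crash fix: On the empty string A raises IndexError (it evaluates s[0] before the loop); B naturally returns ''. — e.g. on makeFancyString(""): A raises IndexError, B returns ""
import Mathlib
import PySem

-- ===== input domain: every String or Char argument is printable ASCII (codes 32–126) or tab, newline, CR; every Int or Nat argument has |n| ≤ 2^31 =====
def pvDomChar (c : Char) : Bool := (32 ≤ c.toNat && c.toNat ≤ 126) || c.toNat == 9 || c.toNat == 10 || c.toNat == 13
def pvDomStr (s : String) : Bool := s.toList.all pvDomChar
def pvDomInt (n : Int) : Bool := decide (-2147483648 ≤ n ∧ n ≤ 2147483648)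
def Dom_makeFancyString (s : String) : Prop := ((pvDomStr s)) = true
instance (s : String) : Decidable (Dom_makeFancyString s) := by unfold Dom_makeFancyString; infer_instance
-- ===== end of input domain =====

-- B replaces A's pointer+counter char-by-char pass by a run-based two-pointer scan
-- emitting min(2, run length) copies of each maximal run (alternative decomposition, same cost).


-- ===== PORT A =====
-- one step of A's for-loop: state (p, curr, fancy_string), index i; l is the full char list
def aStep (l : List Char) (st : Int × Int × List Char) (i : Int) : Int × Int × List Char :=
  let p := st.1
  let curr := st.2.1
  let fancy := st.2.2
  -- if s[i] == s[p]: curr += 1 else: curr = 1; p = i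
  let pc : Int × Int :=
    if PySem.List.pyGetD l i ' ' = PySem.List.pyGetD l p ' ' then (p, curr + 1) else (i, 1)
  -- if curr > 2: continue ; fancy_string += s[i]
  if pc.2 > 2 then (pc.1, pc.2, fancy)
  else (pc.1, pc.2, fancy ++ [PySem.List.pyGetD l i ' '])

def makeFancyString (s : String) : String :=
  let l := s.toList
  -- fancy_string = s[0]  (IndexError on the empty string: excluded by Pre_)
  let fancy : List Char := [PySem.List.pyGetD l 0 ' ']
  let res := (PySem.List.pyRange 1 l.length 1).foldl (aStep l) (0, 1, fancy)
  String.ofList res.2.2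

-- ===== PORT B =====
-- inner while loop: length of the leading run of c in xs, and the remainder
def takeRun (c : Char) : List Char → Nat × List Char
  | [] => (0, [])
  | x :: xs => if x = c then ((takeRun c xs).1 + 1, (takeRun c xs).2) else (0, x :: xs)

theorem takeRun_snd_length_le (c : Char) (xs : List Char) : (takeRun c xs).2.length ≤ xs.length := by
  induction xs with
  | nil => simp [takeRun]
  | cons x xs ih =>
    simp only [takeRun]
    split
    · exact Nat.le_succ_of_le ih
    · simp

-- outer while loop: emit min(2, run length) copies of each maximal run
def altGo : List Char → List Char
  | [] => []
  | c :: xs => List.replicate (min 2 ((takeRun c xs).1 + 1)) c ++ altGo (takeRun c xs).2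
termination_by xs => xs.length
decreasing_by exact Nat.lt_succ_of_le (takeRun_snd_length_le c xs)

def makeFancyString_alt (s : String) : String := String.ofList (altGo s.toList)

-- ===== PRECONDITION & SPEC =====
-- Pre_ excludes only the empty string, on which A raises IndexError at s[0].
def Pre_makeFancyString (s : String) : Prop := s.toList ≠ []
instance (s : String) : Decidable (Pre_makeFancyString s) := by unfold Pre_makeFancyString; infer_instance
def pvWitness_makeFancyString : String := "aaabcc"

-- On the empty string A raises IndexError (it evaluates s[0] before the loop); B naturally returns "".
def Raises_makeFancyString (s : String) : Prop := s.toList = []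
instance (s : String) : Decidable (Raises_makeFancyString s) := by unfold Raises_makeFancyString; infer_instance
def pvRaiseWitness_makeFancyString : String := ""
def pvRaiseWitnessOut_makeFancyString : String := ""

def Spec_makeFancyString (s : String) (out : String) : Prop := out = makeFancyString_alt s
instance (s : String) (out : String) : Decidable (Spec_makeFancyString s out) := by unfold Spec_makeFancyString; infer_instance

-- ===== CLAIM (what is proved, stated in full; the proofs are below) =====
def Claim_equal_makeFancyString : Prop := ∀ (s : String), Dom_makeFancyString s → Pre_makeFancyString s → Spec_makeFancyString s (makeFancyString s)
def Claim_raises_makeFancyString : Prop := (∀ (s : String), Dom_makeFancyString s → Raises_makeFancyString s → ¬ Pre_makeFancyString s) ∧ (Dom_makeFancyString (pvRaiseWitness_makeFancyString) ∧ Raises_makeFancyString (pvRaiseWitness_makeFancyString) ∧ makeFancyString_alt (pvRaiseWitness_makeFancyString) = pvRaiseWitnessOut_makeFancyString)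

-- ===== LEMMAS AND PROOFS =====

-- A's loop as structural recursion on the remaining characters, carrying the current
-- character c (= s[p]) and counter m (= curr); proof-only helper.
def go (c : Char) (m : Int) : List Char → List Char
  | [] => []
  | x :: xs =>
    if x = c then
      if m + 1 > 2 then go c (m + 1) xs else x :: go c (m + 1) xs
    else x :: go x 1 xs

theorem getD_append_length (pre : List Char) (x : Char) (xs : List Char) :
    (pre ++ x :: xs).getD pre.length ' ' = x := by
  simp [List.getD]

theorem foldA (l : List Char) (rest : List Char) : ∀ (pre : List Char) (p curr : Int) (acc : List Char) (c : Char),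
    l = pre ++ rest → PySem.List.pyGetD l p ' ' = c →
    ((PySem.List.pyRange pre.length l.length 1).foldl (aStep l) (p, curr, acc)).2.2
      = acc ++ go c curr rest := by
  induction rest with
  | nil =>
    intro pre p curr acc c hl _
    rw [PySem.List.pyRange_one_eq_nil (by simp [hl])]
    simp [go]
  | cons x xs ih =>
    intro pre p curr acc c hl hc
    have hlen : ((pre.length : Int)) < (l.length : Int) := by simp [hl]
    rw [PySem.List.pyRange_one_cons hlen]
    have hx : PySem.List.pyGetD l (pre.length : Int) ' ' = x := by
      rw [PySem.List.pyGetD_natCast, hl, getD_append_length]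
    simp only [List.foldl_cons]
    have hl' : l = (pre ++ [x]) ++ xs := by simp [hl]
    have hlen' : ((pre ++ [x]).length : Int) = (pre.length : Int) + 1 := by simp
    by_cases heq : x = c
    · -- s[i] == s[p]
      subst heq
      simp only [aStep, hx, hc, ite_true]
      by_cases h2 : curr + 1 > 2
      · rw [if_pos h2]
        have := ih (pre ++ [x]) p (curr + 1) acc x hl' hc
        rw [hlen'] at this
        rw [this]
        simp [go]
        omega
      · rw [if_neg h2]
        have := ih (pre ++ [x]) p (curr + 1) (acc ++ [x]) x hl' hc
        rw [hlen'] at this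
        rw [this]
        simp [go]
        omega
    · -- new run starts at i
      simp only [aStep, hx, hc]
      rw [if_neg heq]
      rw [if_neg (by omega : ¬ ((1 : Int) > 2))]
      have := ih (pre ++ [x]) (pre.length : Int) 1 (acc ++ [x]) x hl' hx
      rw [hlen'] at this
      rw [this]
      simp [go, heq]

-- go and altGo agree: mutual strong induction on length.
theorem go_alt_pair : ∀ (n : Nat) (xs : List Char) (c : Char), xs.length ≤ n →
    (∀ m : Int, 2 ≤ m → go c m xs = altGo (takeRun c xs).2) ∧
    (altGo (c :: xs) = c :: go c 1 xs) := by
  intro n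
  induction n with
  | zero =>
    intro xs c hxs
    have hx : xs = [] := List.eq_nil_of_length_eq_zero (Nat.le_zero.mp hxs)
    subst hx
    exact ⟨fun m _ => by simp [go, takeRun, altGo], by simp [altGo, takeRun, go]⟩
  | succ n ih =>
    intro xs c hxs
    cases xs with
    | nil =>
      exact ⟨fun m _ => by simp [go, takeRun, altGo], by simp [altGo, takeRun, go]⟩
    | cons x xs' =>
      have hlen : xs'.length ≤ n := by simpa using hxs
      constructor
      · intro m hm
        by_cases heq : x = c
        · subst heq
          simp only [go, takeRun, ite_true]
          rw [if_pos (by omega : m + 1 > 2)]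
          exact (ih xs' x hlen).1 (m + 1) (by omega)
        · simp only [go, takeRun]
          rw [if_neg heq, if_neg heq]
          exact ((ih xs' x hlen).2).symm
      · -- altGo (c :: x :: xs') = c :: go c 1 (x :: xs')
        by_cases heq : x = c
        · subst heq
          have hskip := (ih xs' x hlen).1 2 (by omega)
          conv_rhs => rw [show go x 1 (x :: xs') = x :: go x 2 xs' by
            simp only [go, ite_true]; rw [if_neg (by omega : ¬ ((1:Int) + 1 > 2))]; norm_num]
          rw [hskip]
          conv_lhs => rw [show altGo (x :: x :: xs')
              = List.replicate (min 2 ((takeRun x (x :: xs')).1 + 1)) x ++ altGo (takeRun x (x :: xs')).2 by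
            simp [altGo]]
          simp only [takeRun, ite_true]
          rw [show min 2 ((takeRun x xs').1 + 1 + 1) = 2 by omega]
          rfl
        · conv_rhs => rw [show go c 1 (x :: xs') = x :: go x 1 xs' by
            simp only [go]; rw [if_neg heq]]
          rw [← (ih xs' x hlen).2]
          conv_lhs => rw [show altGo (c :: x :: xs')
              = List.replicate (min 2 ((takeRun c (x :: xs')).1 + 1)) c ++ altGo (takeRun c (x :: xs')).2 by
            simp [altGo]]
          simp only [takeRun]
          rw [if_neg heq]
          rfl

theorem altGo_cons (c : Char) (xs : List Char) : altGo (c :: xs) = c :: go c 1 xs :=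
  (go_alt_pair xs.length xs c (Nat.le_refl _)).2

-- ===== VERDICT (by name: the statement is the Claim_ definition above) =====
theorem makeFancyString_spec : Claim_equal_makeFancyString := by
  intro s _ hpre
  unfold Spec_makeFancyString makeFancyString makeFancyString_alt
  cases hl : s.toList with
  | nil => exact absurd hl hpre
  | cons c0 ls =>
    dsimp only
    have hc0 : PySem.List.pyGetD (c0 :: ls) (0 : Int) ' ' = c0 := by
      simp [PySem.List.pyGetD_zero, List.getD]
    rw [hc0]
    have h := foldA (c0 :: ls) ls [c0] 0 1 [c0] c0 rfl hc0
    norm_num at h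
    simp only [List.length_cons, Nat.cast_add, Nat.cast_one]
    rw [h, altGo_cons]

theorem makeFancyString_raises : Claim_raises_makeFancyString := by
  unfold Claim_raises_makeFancyString
  exact ⟨fun s _ hr hp => hp hr,
    by decide,
    by decide,
    by simp [makeFancyString_alt, altGo, pvRaiseWitness_makeFancyString, pvRaiseWitnessOut_makeFancyString]⟩

-- self-check: the raise witness indeed lies outside Pre_ (where A raises, nothing is claimed equal)
theorem pvRaiseWitness_makeFancyString_ok : ¬ Pre_makeFancyString pvRaiseWitness_makeFancyString :=
  makeFancyString_raises.1 pvRaiseWitness_makeFancyString (by decide) (by decide)
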